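-- pv_equiv track=rewrite | github.com/przchojecki/hadamard668 | search37.py | enumerate_profiles
-- ===== SOURCE A (Python) =====
-- def enumerate_profiles(total_sum, sum_sq, n_entries=37):
--     """
--     Enumerate all valid "profiles": how many entries have each absolute value.
--
--     n_1 + n_3 + n_5 + n_7 + n_9 = n_entries
--     n_1*1 + n_3*9 + n_5*25 + n_7*49 + n_9*81 = sum_sq
--     |signed_sum| and sum constraint handled separately.
--
--     Returns list of (n_1, n_3, n_5, n_7, n_9) tuples.
--     """
--     profiles = []
--     for n9 in range(min(n_entries, sum_sq // 81) + 1):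
--         rem9 = sum_sq - 81 * n9
--         left9 = n_entries - n9
--         for n7 in range(min(left9, rem9 // 49) + 1):
--             rem7 = rem9 - 49 * n7
--             left7 = left9 - n7
--             for n5 in range(min(left7, rem7 // 25) + 1):
--                 rem5 = rem7 - 25 * n5
--                 left5 = left7 - n5
--                 for n3 in range(min(left5, rem5 // 9) + 1):
--                     rem3 = rem5 - 9 * n3
--                     n1 = left5 - n3
--                     if n1 >= 0 and n1 * 1 == rem3:
--                         profiles.append((n1, n3, n5, n7, n9))
--     return profiles
-- ===== SOURCE B (Python) =====
-- def enumerate_profiles(total_sum, sum_sq, n_entries=37):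
--     """Same profiles as the naive version, but the innermost loop over n3 is
--     replaced by solving the linear system n1+n3=left5, n1+9*n3=rem5 directly:
--     n3 = (rem5-left5)/8 when that is a nonnegative integer not exceeding left5."""
--     def n3_solutions(left5, rem5):
--         d = rem5 - left5
--         if d % 8 == 0 and 0 <= d // 8 <= left5:
--             return [d // 8]
--         return []
--     return [
--         (left5 - n3, n3, n5, n7, n9)
--         for n9 in range(min(n_entries, sum_sq // 81) + 1)
--         for n7 in range(min(n_entries - n9, (sum_sq - 81 * n9) // 49) + 1)
--         for n5 in range(min(n_entries - n9 - n7, (sum_sq - 81 * n9 - 49 * n7) // 25) + 1)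
--         for left5, rem5 in [(n_entries - n9 - n7 - n5, sum_sq - 81 * n9 - 49 * n7 - 25 * n5)]
--         for n3 in n3_solutions(left5, rem5)
--     ]
-- ===== Notes on version B (the rewrite author's own statement) =====
-- stated objective: faster
-- what changed: The innermost loop over n3 is removed: n3 is obtained in O(1) by solving the linear system n1+n3=left5, n1+9*n3=rem5 (n3=(rem5-left5)/8 when that is a nonnegative integer at most left5), turning the O(n^4) four-level nest into an O(n^3) three-level comprehension.
import Mathlib
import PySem

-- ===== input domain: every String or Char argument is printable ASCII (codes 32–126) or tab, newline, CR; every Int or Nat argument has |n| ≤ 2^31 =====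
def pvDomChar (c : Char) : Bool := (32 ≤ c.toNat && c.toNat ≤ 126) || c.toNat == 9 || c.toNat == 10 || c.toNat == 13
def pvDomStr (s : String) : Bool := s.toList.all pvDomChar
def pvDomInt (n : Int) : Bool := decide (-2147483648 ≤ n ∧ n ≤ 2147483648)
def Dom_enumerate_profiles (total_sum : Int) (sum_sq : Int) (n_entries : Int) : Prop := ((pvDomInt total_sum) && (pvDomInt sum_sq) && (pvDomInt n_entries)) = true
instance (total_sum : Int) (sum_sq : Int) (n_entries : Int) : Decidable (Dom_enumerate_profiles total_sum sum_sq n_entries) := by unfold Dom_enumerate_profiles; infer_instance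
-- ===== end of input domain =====

-- B replaces A's innermost n3 loop by solving the linear system n1+n3=left5, n1+9*n3=rem5
-- directly (n3 = (rem5-left5)//8), an O(n^3) three-level nest instead of A's O(n^4) four-level nest.

-- ===== PORT A =====
def enumerate_profiles (total_sum : Int) (sum_sq : Int) (n_entries : Int) : List (Int × Int × Int × Int × Int) :=
  (PySem.List.pyRange 0 (min n_entries (PySem.Int.floordiv sum_sq 81) + 1) 1).foldl (fun profiles n9 =>
    let rem9 := sum_sq - 81 * n9
    let left9 := n_entries - n9
    (PySem.List.pyRange 0 (min left9 (PySem.Int.floordiv rem9 49) + 1) 1).foldl (fun acc7 n7 =>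
      let rem7 := rem9 - 49 * n7
      let left7 := left9 - n7
      (PySem.List.pyRange 0 (min left7 (PySem.Int.floordiv rem7 25) + 1) 1).foldl (fun acc5 n5 =>
        let rem5 := rem7 - 25 * n5
        let left5 := left7 - n5
        (PySem.List.pyRange 0 (min left5 (PySem.Int.floordiv rem5 9) + 1) 1).foldl (fun acc3 n3 =>
          let rem3 := rem5 - 9 * n3
          let n1 := left5 - n3
          if 0 ≤ n1 ∧ n1 * 1 = rem3 then acc3 ++ [(n1, n3, n5, n7, n9)] else acc3) acc5) acc7) profiles) []

-- ===== PORT B =====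
def n3_solutions (left5 : Int) (rem5 : Int) : List Int :=
  let d := rem5 - left5
  if PySem.Int.mod d 8 = 0 ∧ 0 ≤ PySem.Int.floordiv d 8 ∧ PySem.Int.floordiv d 8 ≤ left5 then
    [PySem.Int.floordiv d 8]
  else []

def enumerate_profiles_alt (total_sum : Int) (sum_sq : Int) (n_entries : Int) : List (Int × Int × Int × Int × Int) :=
  (PySem.List.pyRange 0 (min n_entries (PySem.Int.floordiv sum_sq 81) + 1) 1).flatMap (fun n9 =>
    (PySem.List.pyRange 0 (min (n_entries - n9) (PySem.Int.floordiv (sum_sq - 81 * n9) 49) + 1) 1).flatMap (fun n7 =>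
      (PySem.List.pyRange 0 (min (n_entries - n9 - n7) (PySem.Int.floordiv (sum_sq - 81 * n9 - 49 * n7) 25) + 1) 1).flatMap (fun n5 =>
        let left5 := n_entries - n9 - n7 - n5
        let rem5 := sum_sq - 81 * n9 - 49 * n7 - 25 * n5
        (n3_solutions left5 rem5).map (fun n3 => (left5 - n3, n3, n5, n7, n9)))))

-- ===== PRECONDITION & SPEC =====
def Spec_enumerate_profiles (total_sum : Int) (sum_sq : Int) (n_entries : Int) (out : List (Int × Int × Int × Int × Int)) : Prop := out = enumerate_profiles_alt total_sum sum_sq n_entries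
instance (total_sum : Int) (sum_sq : Int) (n_entries : Int) (out : List (Int × Int × Int × Int × Int)) : Decidable (Spec_enumerate_profiles total_sum sum_sq n_entries out) := by unfold Spec_enumerate_profiles; infer_instance

-- ===== CLAIM (what is proved, stated in full; the proofs are below) =====
def Claim_equal_enumerate_profiles : Prop := ∀ (total_sum : Int) (sum_sq : Int) (n_entries : Int), Dom_enumerate_profiles total_sum sum_sq n_entries → Spec_enumerate_profiles total_sum sum_sq n_entries (enumerate_profiles total_sum sum_sq n_entries)

-- ===== LEMMAS AND PROOFS =====

theorem filter_beq_of_nodup (l : List Int) (hl : l.Nodup) (m : Int) (hm : m ∈ l) :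
    l.filter (fun x => x == m) = [m] := by
  induction l with
  | nil => cases hm
  | cons a t ih =>
    rcases List.nodup_cons.mp hl with ⟨ha, ht⟩
    rcases List.mem_cons.mp hm with h | h
    · subst h
      have hnil : t.filter (fun x => x == m) = [] := by
        apply List.filter_eq_nil_iff.mpr
        intro x hx
        simp only [beq_iff_eq]
        intro hxm; exact ha (hxm ▸ hx)
      simp [hnil]
    · have hne : (a == m) = false := by
        simp only [beq_eq_false_iff_ne]
        intro ham; exact ha (ham ▸ h)
      simp [hne, ih ht h]

theorem filter_n3 (left5 rem5 : Int) :
    (PySem.List.pyRange 0 (min left5 (PySem.Int.floordiv rem5 9) + 1) 1).filter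
      (fun n3 => decide (0 ≤ left5 - n3 ∧ (left5 - n3) * 1 = rem5 - 9 * n3))
    = n3_solutions left5 rem5 := by
  have h9 : PySem.Int.floordiv rem5 9 = rem5 / 9 := PySem.Int.floordiv_eq_ediv_of_pos (by norm_num)
  have h8d : PySem.Int.floordiv (rem5 - left5) 8 = (rem5 - left5) / 8 :=
    PySem.Int.floordiv_eq_ediv_of_pos (by norm_num)
  have h8m : PySem.Int.mod (rem5 - left5) 8 = (rem5 - left5) % 8 :=
    PySem.Int.mod_eq_emod_of_pos (by norm_num)
  unfold n3_solutions
  simp only [h8d, h8m, h9]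
  split_ifs with h
  · set m := (rem5 - left5) / 8 with hmdef
    have hch : ∀ x ∈ PySem.List.pyRange 0 (min left5 (rem5 / 9) + 1) 1,
        (decide (0 ≤ left5 - x ∧ (left5 - x) * 1 = rem5 - 9 * x)) = (x == m) := by
      intro x hx
      have hx' := (PySem.List.mem_pyRange_one).mp hx
      rw [Bool.eq_iff_iff]
      simp only [decide_eq_true_eq, beq_iff_eq]
      constructor
      · rintro ⟨h1, h2⟩; omega
      · rintro rfl; omega
    rw [List.filter_congr hch]
    apply filter_beq_of_nodup _ (PySem.List.nodup_pyRange_one _ _)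
    apply (PySem.List.mem_pyRange_one).mpr
    omega
  · apply List.filter_eq_nil_iff.mpr
    intro x hx
    have hx' := (PySem.List.mem_pyRange_one).mp hx
    simp only [decide_eq_true_eq, not_and]
    intro h1 h2
    omega

-- ===== VERDICT (by name: the statement is the Claim_ definition above) =====
theorem enumerate_profiles_spec : Claim_equal_enumerate_profiles := by
  intro total_sum sum_sq n_entries _
  unfold Spec_enumerate_profiles enumerate_profiles enumerate_profiles_alt
  simp only [PySem.List.foldl_append_ite, filter_n3, PySem.List.foldl_append_eq_flatMap,
    List.nil_append]
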